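-- pv_equiv track=rewrite | github.com/jcolinpatrick/kryptos | scripts/e_k4_simple_columnar_04.py | simple_columnar_spiral
-- ===== SOURCE A (Python) =====
-- def simple_columnar_spiral(ct, width):
--     """Write row-major, read columns in spiral (out from center)."""
--     if len(ct) % width != 0:
--         return None
--     nrows = len(ct) // width
--
--     # Spiral order: center outward
--     center = width // 2
--     spiral_cols = [center]
--     for dist in range(1, width):
--         if center + dist < width:
--             spiral_cols.append(center + dist)
--         if center - dist >= 0:
--             spiral_cols.append(center - dist)
--
--     pt = []
--     for col in spiral_cols[:width]:
--         for row in range(nrows):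
--             pt.append(ct[row * width + col])
--     return ''.join(pt)
-- ===== SOURCE B (Python) =====
-- def simple_columnar_spiral(ct, width):
--     """Write row-major, read columns in spiral (out from center)."""
--     if len(ct) % width != 0:
--         return None
--     center = width // 2
--     # spiral rank of column c as a single integer key: distance from the
--     # center first, and for equal distance the right column before the left
--     span = 2 * width + 1
--     order = sorted(range(width), key=lambda c: abs(c - center) * span + (center - c))
--     return ''.join(ct[c::width] for c in order)
-- ===== Notes on version B (the rewrite author's own statement) =====
-- stated objective: simpler
-- what changed: A's incremental spiral-order loop with per-column row loops is replaced by sorting the columns once with a spiral-distance sort key and concatenating one stride slice ct[c::width] per column.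
import Mathlib
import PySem

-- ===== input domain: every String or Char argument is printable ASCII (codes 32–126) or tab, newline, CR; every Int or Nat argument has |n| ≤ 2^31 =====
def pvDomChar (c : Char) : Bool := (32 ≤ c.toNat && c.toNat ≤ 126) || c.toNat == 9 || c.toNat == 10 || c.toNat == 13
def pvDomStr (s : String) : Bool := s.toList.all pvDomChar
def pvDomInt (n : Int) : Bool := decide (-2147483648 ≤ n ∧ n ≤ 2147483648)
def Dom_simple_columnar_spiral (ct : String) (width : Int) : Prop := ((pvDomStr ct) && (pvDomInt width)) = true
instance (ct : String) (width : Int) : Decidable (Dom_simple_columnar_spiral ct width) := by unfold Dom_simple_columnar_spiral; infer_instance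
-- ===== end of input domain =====

-- B replaces A's incremental spiral-order loop and per-column row loop by a sort
-- with a spiral rank key and one stride slice per column (objective: simpler).

-- ===== PORT A =====
def simple_columnar_spiral (ct : String) (width : Int) : Option String :=
  let cs := ct.toList
  if PySem.Int.mod (cs.length : Int) width ≠ 0 then none
  else
    let nrows := PySem.Int.floordiv (cs.length : Int) width
    let center := PySem.Int.floordiv width 2
    let spiral_cols := (PySem.List.pyRange 1 width 1).foldl (fun acc dist =>
        let acc1 := if center + dist < width then acc ++ [center + dist] else acc
        if 0 ≤ center - dist then acc1 ++ [center - dist] else acc1) [center]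
    let cols := PySem.List.slice spiral_cols none (some width)
    -- ct[row*width+col]: always in range on the admitted inputs (width ≠ 0)
    let pt := cols.foldl (fun acc col =>
        (PySem.List.pyRange 0 nrows 1).foldl (fun acc row =>
            acc ++ [PySem.List.pyGetD cs (row * width + col) ' ']) acc) ([] : List Char)
    some (String.ofList pt)

-- ===== PORT B =====
def simple_columnar_spiral_alt (ct : String) (width : Int) : Option String :=
  let cs := ct.toList
  if PySem.Int.mod (cs.length : Int) width ≠ 0 then none
  else
    let center := PySem.Int.floordiv width 2
    let span := 2 * width + 1
    let order := PySem.List.sorted (PySem.List.pyRange 0 width 1)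
        (fun c => |c - center| * span + (center - c))
    some (String.ofList (order.flatMap (fun c =>
        (PySem.List.slice? cs (some c) none width).getD [])))

-- ===== PRECONDITION & SPEC =====
-- width = 0 makes both Pythons raise ZeroDivisionError at 'len(ct) % width'.
def Pre_simple_columnar_spiral (ct : String) (width : Int) : Prop := width ≠ 0
instance (ct : String) (width : Int) : Decidable (Pre_simple_columnar_spiral ct width) := by unfold Pre_simple_columnar_spiral; infer_instance
def pvWitness_simple_columnar_spiral : String × Int := ("ABCDEF", 3)
def Spec_simple_columnar_spiral (ct : String) (width : Int) (out : Option String) : Prop := out = simple_columnar_spiral_alt ct width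
instance (ct : String) (width : Int) (out : Option String) : Decidable (Spec_simple_columnar_spiral ct width out) := by unfold Spec_simple_columnar_spiral; infer_instance

-- ===== CLAIM (what is proved, stated in full; the proofs are below) =====
def Claim_equal_simple_columnar_spiral : Prop := ∀ (ct : String) (width : Int), Dom_simple_columnar_spiral ct width → Pre_simple_columnar_spiral ct width → Spec_simple_columnar_spiral ct width (simple_columnar_spiral ct width)

-- ===== LEMMAS AND PROOFS =====

-- the two columns appended for one distance in A's spiral loop
def pvGcol (center w d : Int) : List Int :=
  (if center + d < w then [center + d] else []) ++ (if 0 ≤ center - d then [center - d] else [])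

-- B's sort key
def pvSkey (center span c : Int) : Int := |c - center| * span + (center - c)

theorem pvSpiral_fold (center w : Int) :
    (PySem.List.pyRange 1 w 1).foldl (fun acc dist =>
        let acc1 := if center + dist < w then acc ++ [center + dist] else acc
        if 0 ≤ center - dist then acc1 ++ [center - dist] else acc1) [center]
      = center :: (PySem.List.pyRange 1 w 1).flatMap (pvGcol center w) := by
  have hfun : (fun (acc : List Int) dist =>
        let acc1 := if center + dist < w then acc ++ [center + dist] else acc
        if 0 ≤ center - dist then acc1 ++ [center - dist] else acc1)
      = fun acc d => acc ++ pvGcol center w d := by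
    funext acc d
    simp only [pvGcol]
    split_ifs <;> simp
  rw [hfun, PySem.List.foldl_append_eq_flatMap]
  rfl

theorem pvMem_gcol {center w d x : Int} :
    x ∈ pvGcol center w d ↔
      (x = center + d ∧ center + d < w) ∨ (x = center - d ∧ 0 ≤ center - d) := by
  simp only [pvGcol, List.mem_append]
  split_ifs <;> simp_all

theorem pvSkey_mem_gcol {center w span d x : Int} (hx : x ∈ pvGcol center w d) (hd : 0 ≤ d) :
    ∃ e, |e| ≤ d ∧ pvSkey center span x = d * span + e := by
  rcases pvMem_gcol.mp hx with ⟨rfl, _⟩ | ⟨rfl, _⟩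
  · refine ⟨-d, by simp [abs_of_nonneg hd], ?_⟩
    simp only [pvSkey, show center + d - center = d by ring, abs_of_nonneg hd]
    ring
  · refine ⟨d, by simp [abs_of_nonneg hd], ?_⟩
    simp only [pvSkey, show center - d - center = -d by ring, abs_neg, abs_of_nonneg hd]
    ring

theorem pvSkey_step {w a d e e' : Int} (hw : 1 ≤ w) (ha : 1 ≤ a) (_ : a < d) (hdw : d < w)
    (he : |e| ≤ a) (he' : |e'| ≤ d) :
    a * (2 * w + 1) + e < d * (2 * w + 1) + e' := by
  have h1 := abs_le.mp he
  have h2 := abs_le.mp he'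
  nlinarith [mul_le_mul_of_nonneg_right (by omega : a + 1 ≤ d) (by omega : (0:Int) ≤ 2 * w + 1)]

theorem pvPairwise_gcol {center w d : Int} (hd : 1 ≤ d) (span : Int) :
    (pvGcol center w d).Pairwise (fun x y => pvSkey center span x < pvSkey center span y) := by
  have h1 : pvSkey center span (center + d) < pvSkey center span (center - d) := by
    simp only [pvSkey, show center + d - center = d by ring,
      show center - d - center = -d by ring, abs_neg, abs_of_nonneg (by omega : (0:Int) ≤ d)]
    omega
  simp only [pvGcol]
  split_ifs <;> simp [h1]

theorem pvTail_pairwise (w center : Int) (hw : 1 ≤ w) :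
    ∀ (k : Nat) (a : Int), 1 ≤ a → (w - a).toNat ≤ k →
      ((PySem.List.pyRange a w 1).flatMap (pvGcol center w)).Pairwise
        (fun x y => pvSkey center (2 * w + 1) x < pvSkey center (2 * w + 1) y) := by
  intro k
  induction k with
  | zero =>
    intro a ha hk
    rw [PySem.List.pyRange_one_eq_nil (by omega)]
    simp
  | succ k ih =>
    intro a ha hk
    by_cases hwa : w ≤ a
    · rw [PySem.List.pyRange_one_eq_nil hwa]; simp
    · rw [PySem.List.pyRange_one_cons (by omega), List.flatMap_cons, List.pairwise_append]
      refine ⟨pvPairwise_gcol ha _, ih (a + 1) (by omega) (by omega), ?_⟩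
      intro x hx y hy
      rcases List.mem_flatMap.mp hy with ⟨d, hdmem, hyg⟩
      have hd := PySem.List.mem_pyRange_one.mp hdmem
      obtain ⟨e, he, hex⟩ := pvSkey_mem_gcol hx (by omega)
      obtain ⟨e', he', hey⟩ := pvSkey_mem_gcol hyg (by omega)
      rw [hex, hey]
      exact pvSkey_step hw ha (by omega) (by omega) he he'

theorem pvSpiral_pairwise (w center : Int) (hw : 1 ≤ w) :
    (center :: (PySem.List.pyRange 1 w 1).flatMap (pvGcol center w)).Pairwise
      (fun x y => pvSkey center (2 * w + 1) x < pvSkey center (2 * w + 1) y) := by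
  rw [List.pairwise_cons]
  refine ⟨?_, pvTail_pairwise w center hw (w - 1).toNat 1 (by omega) (by omega)⟩
  intro y hy
  rcases List.mem_flatMap.mp hy with ⟨d, hdmem, hyg⟩
  have hd := PySem.List.mem_pyRange_one.mp hdmem
  obtain ⟨e, he, hey⟩ := pvSkey_mem_gcol hyg (by omega)
  have h1 := abs_le.mp he
  have hc : pvSkey center (2 * w + 1) center = 0 := by simp [pvSkey]
  rw [hc, hey]
  nlinarith [hd.1, hd.2]

theorem pvMem_spiral {w center x : Int} (hw : 1 ≤ w) (h0 : 0 ≤ center) (hcw : center < w) :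
    (x ∈ center :: (PySem.List.pyRange 1 w 1).flatMap (pvGcol center w)) ↔ (0 ≤ x ∧ x < w) := by
  simp only [List.mem_cons, List.mem_flatMap]
  constructor
  · rintro (rfl | ⟨d, hdmem, hxg⟩)
    · omega
    · have hd := PySem.List.mem_pyRange_one.mp hdmem
      rcases pvMem_gcol.mp hxg with ⟨rfl, h⟩ | ⟨rfl, h⟩ <;> omega
  · intro hx
    rcases lt_trichotomy x center with h | h | h
    · exact Or.inr ⟨center - x, PySem.List.mem_pyRange_one.mpr (by omega),
        pvMem_gcol.mpr (Or.inr ⟨by ring, by omega⟩)⟩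
    · exact Or.inl h
    · exact Or.inr ⟨x - center, PySem.List.mem_pyRange_one.mpr (by omega),
        pvMem_gcol.mpr (Or.inl ⟨by ring, by omega⟩)⟩

theorem pvOrder_eq_spiral (w center : Int) (hw : 1 ≤ w) (h0 : 0 ≤ center) (hcw : center < w) :
    PySem.List.sorted (PySem.List.pyRange 0 w 1) (fun c => pvSkey center (2 * w + 1) c)
      = center :: (PySem.List.pyRange 1 w 1).flatMap (pvGcol center w) := by
  have hpw := pvSpiral_pairwise w center hw
  have hnd : (center :: (PySem.List.pyRange 1 w 1).flatMap (pvGcol center w)).Nodup :=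
    hpw.imp (fun h => by rintro rfl; exact lt_irrefl _ h)
  refine PySem.List.sorted_eq_of_perm_of_pairwise_lt _ _ _ ?_ hpw
  refine (List.perm_ext_iff_of_nodup hnd (PySem.List.nodup_pyRange_one 0 w)).mpr ?_
  intro x
  rw [pvMem_spiral hw h0 hcw, PySem.List.mem_pyRange_one]

-- the column equality: A's row loop over one column = B's stride slice
theorem pvCol_eq (cs : List Char) (w c nr : Int) (hw : 1 ≤ w) (hc : 0 ≤ c) (hcw : c < w)
    (hn : (cs.length : Int) = nr * w) (hnr : 0 ≤ nr) :
    (PySem.List.pyRange 0 nr 1).map (fun row => PySem.List.pyGetD cs (row * w + c) ' ')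
      = (PySem.List.slice? cs (some c) none w).getD [] := by
  have hw0 : w ≠ 0 := by omega
  have hwneg : ¬ w < 0 := by omega
  simp only [PySem.List.slice?, PySem.List.sliceIndices, if_neg hw0, hwneg, if_false,
    if_neg (by omega : ¬ (c < 0)), if_pos (by omega : 0 < w)]
  rcases eq_or_lt_of_le hnr with hnr0 | hnr1
  · -- the empty string: both sides are []
    have hn0 : (cs.length : Int) = 0 := by rw [hn, ← hnr0, zero_mul]
    rw [PySem.List.pyRange_one_eq_nil (by omega)]
    simp [hn0, min_eq_right (by omega : (0:Int) ≤ c)]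
  · have hcn : min c (cs.length : Int) = c := min_eq_left (by nlinarith)
    rw [hcn, if_pos (by nlinarith : c < (cs.length : Int))]
    have hcount : ((cs.length : Int) - c + w - 1) / w = nr := by
      rw [show (cs.length : Int) - c + w - 1 = (w - 1 - c) + nr * w by omega,
        Int.add_mul_ediv_right _ _ hw0, Int.ediv_eq_zero_of_lt (by omega) (by omega), zero_add]
    rw [hcount]
    have key : ∀ k : Nat, k < nr.toNat →
        ((c + w * (k : Int)).toNat < cs.length ∧
         ((0 + (k:Int)) * w + c) = (c + w * (k:Int))) := by
      intro k hk
      constructor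
      · have h1 : c + w * (k : Int) < (cs.length : Int) := by
          rw [hn]
          have : (k : Int) ≤ nr - 1 := by omega
          nlinarith
        have hg : 0 ≤ w * (k:Int) := by positivity
        omega
      · ring
    rw [PySem.List.pyRange_one, List.map_map]
    have lhs_eq : ∀ k ∈ List.range (nr - 0).toNat,
        ((fun row => PySem.List.pyGetD cs (row * w + c) ' ') ∘ fun k : Nat => 0 + (k:Int)) k
          = cs.getD (c + w * (k:Int)).toNat ' ' := by
      intro k hk
      have hk' := List.mem_range.mp hk
      obtain ⟨hb, hidx⟩ := key k (by omega)
      simp only [Function.comp]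
      rw [hidx, PySem.List.pyGetD_of_nonneg cs ' ' (by positivity)]
    have rhs_eq : ∀ k ∈ List.range nr.toNat,
        cs[(c + w * (k:Int)).toNat]? = some (cs.getD (c + w * (k:Int)).toNat ' ') := by
      intro k hk
      have hk' := List.mem_range.mp hk
      obtain ⟨hb, _⟩ := key k hk'
      rw [List.getElem?_eq_getElem hb, List.getD_eq_getElem _ _ hb]
    rw [List.map_congr_left lhs_eq, List.filterMap_congr rhs_eq, sub_zero]
    simp

-- ===== VERDICT (by name: the statement is the Claim_ definition above) =====
theorem simple_columnar_spiral_spec : Claim_equal_simple_columnar_spiral := by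
  unfold Claim_equal_simple_columnar_spiral
  intro ct width _ hpre
  unfold Spec_simple_columnar_spiral simple_columnar_spiral simple_columnar_spiral_alt
  by_cases hmod : PySem.Int.mod ((ct.toList.length : Int)) width ≠ 0
  · simp only [if_pos hmod]
  · rw [not_not] at hmod
    have hdvd : width ∣ (ct.toList.length : Int) := Int.dvd_iff_fmod_eq_zero.mpr hmod
    simp only [hmod, ne_eq, not_true_eq_false, if_false]
    have hfd : PySem.Int.floordiv ((ct.toList.length : Int)) width = (ct.toList.length : Int) / width := by
      unfold PySem.Int.floordiv
      rw [Int.fdiv_eq_ediv, if_pos (Or.inr hdvd), sub_zero]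
    rcases lt_or_gt_of_ne (by exact_mod_cast hpre : width ≠ 0) with hneg | hpos
    · -- width < 0: both sides produce the empty string
      have hnr : PySem.Int.floordiv ((ct.toList.length : Int)) width ≤ 0 := by
        rw [hfd]
        exact Int.ediv_nonpos_of_nonneg_of_nonpos (Int.natCast_nonneg _) (by omega)
      rw [PySem.List.pyRange_one_eq_nil hnr, PySem.List.pyRange_one_eq_nil (by omega : width ≤ 0)]
      simp [List.foldl_fixed, PySem.List.sorted]
    · -- width ≥ 1
      have hw1 : 1 ≤ width := hpos
      have hcen : PySem.Int.floordiv width 2 = width / 2 := by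
        unfold PySem.Int.floordiv
        rw [Int.fdiv_eq_ediv, if_pos (Or.inl (by omega)), sub_zero]
      have hc0 : 0 ≤ width / 2 := by omega
      have hcw : width / 2 < width := by omega
      rw [hfd, hcen, pvSpiral_fold]
      have horder :
          PySem.List.sorted (PySem.List.pyRange 0 width 1)
              (fun c => |c - width / 2| * (2 * width + 1) + (width / 2 - c))
            = (width / 2) :: (PySem.List.pyRange 1 width 1).flatMap (pvGcol (width / 2) width) := by
        have := pvOrder_eq_spiral width (width / 2) hw1 hc0 hcw
        simpa [pvSkey] using this
      rw [horder]
      set spiral := (width / 2) :: (PySem.List.pyRange 1 width 1).flatMap (pvGcol (width / 2) width) with hsp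
      have hlen : spiral.length = width.toNat := by
        have := congrArg List.length horder
        rw [PySem.List.length_sorted, PySem.List.length_pyRange_one, sub_zero] at this
        exact this.symm
      have hslice : PySem.List.slice spiral none (some width) = spiral := by
        rw [PySem.List.slice_to spiral (by omega : (0:Int) ≤ width)]
        exact List.take_of_length_le (by omega)
      rw [hslice]
      -- turn A's nested loops into a flatMap of per-column maps
      have hinner : (fun (acc : List Char) (col : Int) =>
            (PySem.List.pyRange 0 ((ct.toList.length : Int) / width) 1).foldl (fun acc row =>
              acc ++ [PySem.List.pyGetD ct.toList (row * width + col) ' ']) acc)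
          = fun acc col => acc ++ (PySem.List.pyRange 0 ((ct.toList.length : Int) / width) 1).map
              (fun row => PySem.List.pyGetD ct.toList (row * width + col) ' ') := by
        funext acc col
        rw [PySem.List.foldl_append_singleton_eq_map]
      rw [hinner, PySem.List.foldl_append_eq_flatMap, List.nil_append]
      -- per-column: A's gathered column = B's stride slice
      congr 1
      apply congrArg
      apply List.flatMap_congr
      intro c hcmem
      have hcb : 0 ≤ c ∧ c < width := (pvMem_spiral hw1 hc0 hcw).mp (hsp ▸ hcmem)
      exact pvCol_eq ct.toList width c ((ct.toList.length : Int) / width) hw1 hcb.1 hcb.2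
        (Int.ediv_mul_cancel hdvd).symm (Int.ediv_nonneg (Int.natCast_nonneg _) (by omega))
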